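-- pv_equiv track=rewrite | github.com/driuba/advent-of-code-25 | day-12/tiler.py | calculate_internal_area
-- ===== SOURCE A (Python) =====
-- from collections import deque
--
-- def calculate_internal_area(grid):
-- 	areas = []
-- 	visited = set()
--
-- 	for (index_row, row) in enumerate(grid):
-- 		for (index_column, cell) in enumerate(row):
-- 			if cell:
-- 				continue
--
-- 			position = (index_row, index_column)
--
-- 			if position in visited:
-- 				continue
--
-- 			area_current = set()
--
-- 			queue = deque()
-- 			queue.append(position)
--
-- 			while queue:
-- 				position = queue.popleft()
--
-- 				if grid[position[0]][position[1]]: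
-- 					continue
--
-- 				if position in visited:
-- 					continue
--
-- 				visited.add(position)
--
-- 				area_current.add(position)
--
-- 				if position[0] > 0:
-- 					queue.append((position[0] - 1, position[1]))
--
-- 				if position[0] < len(grid) - 1:
-- 					queue.append((position[0] + 1, position[1]))
--
-- 				if position[1] > 0:
-- 					queue.append((position[0], position[1] - 1))
--
-- 				if position[1] < len(grid[0]) - 1:
-- 					queue.append((position[0], position[1] + 1))
--
-- 			if all((0 < r < len(grid) - 1 and 0 < c < len(grid[0]) - 1 for (r, c) in area_current)):
-- 				areas.append(area_current)
--
-- 	return sum((len(a) for a in areas))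
-- ===== SOURCE B (Python) =====
-- def calculate_internal_area(grid):
--     rows = len(grid)
--     cols = len(grid[0]) if grid else 0
--     # mark the empty border cells, then propagate the mark inward to saturation
--     marked = [[(not grid[r][c]) and (r == 0 or r == rows - 1 or c == 0 or c == cols - 1)
--                for c in range(cols)] for r in range(rows)]
--     for _ in range(rows * cols):
--         marked = [[marked[r][c] or ((not grid[r][c]) and (
--                       (r > 0 and marked[r - 1][c]) or
--                       (r + 1 < rows and marked[r + 1][c]) or
--                       (c > 0 and marked[r][c - 1]) or
--                       (c + 1 < cols and marked[r][c + 1])))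
--                    for c in range(cols)] for r in range(rows)]
--     empties = sum(1 for r in range(rows) for c in range(cols) if not grid[r][c])
--     reachable = sum(row.count(True) for row in marked)
--     return empties - reachable
-- ===== Notes on version B (the rewrite author's own statement) =====
-- stated objective: alternative
-- what changed: Replaced BFS flood-fill component enumeration with a whole-grid boolean fixpoint: mark empty border cells and propagate the mark inward to saturation, then return (number of empty cells) minus (number of marked cells).
-- outside the precondition, e.g. on calculate_internal_area([[True, True], [True]]): A returns 0, B raises IndexError; on calculate_internal_area([[False], [True, True]]): A returns 0, B returns 0
import Mathlib
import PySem

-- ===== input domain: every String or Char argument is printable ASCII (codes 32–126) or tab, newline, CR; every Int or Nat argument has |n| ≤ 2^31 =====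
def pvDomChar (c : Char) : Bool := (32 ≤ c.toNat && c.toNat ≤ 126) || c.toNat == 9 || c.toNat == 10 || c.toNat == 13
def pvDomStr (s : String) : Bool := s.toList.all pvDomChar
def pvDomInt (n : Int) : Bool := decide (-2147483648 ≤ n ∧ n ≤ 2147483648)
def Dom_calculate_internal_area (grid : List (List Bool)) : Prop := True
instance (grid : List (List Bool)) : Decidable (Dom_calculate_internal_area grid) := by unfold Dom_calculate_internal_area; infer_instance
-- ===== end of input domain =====

-- B replaces BFS component enumeration by border-mark propagation to a fixpoint (alternative algorithm,
-- not claimed faster); equivalence is proved on rectangular grids (Pre_), the domain A effectively assumes.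

-- ===== PORT A =====
-- cell lookup grid[r][c]; inside Pre_ every access the program makes is in range, so getD is exact
def pvCell (grid : List (List Bool)) (r c : ℕ) : Bool := (grid.getD r []).getD c true

-- list(enumerate(xs)): indices are nonnegative throughout, so nat indices are exact
def pvEnum {α : Type} : List α → ℕ → List (ℕ × α)
  | [], _ => []
  | x :: xs, i => (i, x) :: pvEnum xs (i + 1)

-- the four neighbour appends, in A's order, with A's guards (r>0, r<len(grid)-1, c>0, c<len(grid[0])-1)
def pvNbrs (R C : ℕ) (p : ℕ × ℕ) : List (ℕ × ℕ) :=
  (if 0 < p.1 then [(p.1 - 1, p.2)] else []) ++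
  (if p.1 + 1 < R then [(p.1 + 1, p.2)] else []) ++
  (if 0 < p.2 then [(p.1, p.2 - 1)] else []) ++
  (if p.2 + 1 < C then [(p.1, p.2 + 1)] else [])

-- the while-queue loop; visited/area are Python sets whose inserts are guarded by membership, so
-- append-once lists represent them exactly; fuel only makes the same computation total (never exhausted)
def pvBfs (grid : List (List Bool)) (R C : ℕ) :
    ℕ → List (ℕ × ℕ) → List (ℕ × ℕ) → List (ℕ × ℕ) → (List (ℕ × ℕ) × List (ℕ × ℕ))
  | _, [], V, A => (V, A)
  | 0, _ :: _, V, A => (V, A)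
  | f + 1, p :: q, V, A =>
    if pvCell grid p.1 p.2 then pvBfs grid R C f q V A
    else if p ∈ V then pvBfs grid R C f q V A
    else pvBfs grid R C f (q ++ pvNbrs R C p) (V ++ [p]) (A ++ [p])

-- Python's all(0 < r < len(grid)-1 and 0 < c < len(grid[0])-1 for (r,c) in area), over ints
def pvInterior (R C : ℕ) (a : List (ℕ × ℕ)) : Bool :=
  a.all fun p => decide (0 < (p.1 : Int) ∧ (p.1 : Int) < (R : Int) - 1 ∧
    0 < (p.2 : Int) ∧ (p.2 : Int) < (C : Int) - 1)

-- inner loop over enumerate(row)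
def pvRowLoop (grid : List (List Bool)) (R C r : ℕ) :
    List (ℕ × Bool) → List (ℕ × ℕ) → List (List (ℕ × ℕ)) → (List (ℕ × ℕ) × List (List (ℕ × ℕ)))
  | [], V, areas => (V, areas)
  | (c, cell) :: rest, V, areas =>
    if cell then pvRowLoop grid R C r rest V areas
    else if (r, c) ∈ V then pvRowLoop grid R C r rest V areas
    else
      let res := pvBfs grid R C (4 * (R * C) + 1) [(r, c)] V []
      pvRowLoop grid R C r rest res.1
        (if pvInterior R C res.2 then areas ++ [res.2] else areas)

-- outer loop over enumerate(grid)
def pvRowsLoop (grid : List (List Bool)) (R C : ℕ) :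
    List (ℕ × List Bool) → List (ℕ × ℕ) → List (List (ℕ × ℕ)) → List (List (ℕ × ℕ))
  | [], _, areas => areas
  | (r, row) :: rest, V, areas =>
    let res := pvRowLoop grid R C r (pvEnum row 0) V areas
    pvRowsLoop grid R C rest res.1 res.2

def calculate_internal_area (grid : List (List Bool)) : Int :=
  let areas := pvRowsLoop grid grid.length (grid.headD []).length (pvEnum grid 0) [] []
  ((areas.map List.length).sum : ℕ)

-- ===== PORT B =====
-- marked[r][c] lookup (Source B only reads in-range entries, so the default is never the value used)
def pvMget (m : List (List Bool)) (r c : ℕ) : Bool := (m.getD r []).getD c false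

-- initial marking: empty border cells
def pvMark0 (grid : List (List Bool)) (rows cols : ℕ) : List (List Bool) :=
  (List.range rows).map fun r => (List.range cols).map fun c =>
    (!pvCell grid r c) &&
      (decide (r = 0) || decide (r = rows - 1) || decide (c = 0) || decide (c = cols - 1))

-- one propagation sweep, built from the previous marking
def pvStep (grid : List (List Bool)) (rows cols : ℕ) (m : List (List Bool)) : List (List Bool) :=
  (List.range rows).map fun r => (List.range cols).map fun c =>
    pvMget m r c || ((!pvCell grid r c) &&
      ((decide (0 < r) && pvMget m (r - 1) c) ||
       (decide (r + 1 < rows) && pvMget m (r + 1) c) ||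
       (decide (0 < c) && pvMget m r (c - 1)) ||
       (decide (c + 1 < cols) && pvMget m r (c + 1))))

def calculate_internal_area_alt (grid : List (List Bool)) : Int :=
  let rows := grid.length
  let cols := (grid.headD []).length
  let marked := (List.range (rows * cols)).foldl (fun m _ => pvStep grid rows cols m)
    (pvMark0 grid rows cols)
  let empties := ((List.range rows).map fun r =>
    ((List.range cols).filter fun c => !pvCell grid r c).length).sum
  let reachable := (marked.map fun row => row.count true).sum
  (empties : Int) - (reachable : Int)

-- ===== PRECONDITION & SPEC =====
-- Pre_ excludes ragged grids (rows of unequal length): there A's uniform use of len(grid[0]) as the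
-- width is accidental and both programs may raise IndexError.
def Pre_calculate_internal_area (grid : List (List Bool)) : Prop :=
  ∀ row ∈ grid, row.length = (grid.headD []).length
instance (grid : List (List Bool)) : Decidable (Pre_calculate_internal_area grid) := by
  unfold Pre_calculate_internal_area; infer_instance
def pvWitness_calculate_internal_area : List (List Bool) :=
  [[true, true, true], [true, false, true], [true, true, true]]
def Spec_calculate_internal_area (grid : List (List Bool)) (out : Int) : Prop := out = calculate_internal_area_alt grid
instance (grid : List (List Bool)) (out : Int) : Decidable (Spec_calculate_internal_area grid out) := by unfold Spec_calculate_internal_area; infer_instance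

-- ===== CLAIM (what is proved, stated in full; the proofs are below) =====
def Claim_equal_calculate_internal_area : Prop := ∀ (grid : List (List Bool)), Dom_calculate_internal_area grid → Pre_calculate_internal_area grid → Spec_calculate_internal_area grid (calculate_internal_area grid)

-- ===== LEMMAS AND PROOFS =====

-- abbreviations (proof layer only)
def empB (G : List (List Bool)) (p : ℕ × ℕ) : Bool :=
  decide (p.1 < G.length) && decide (p.2 < (G.headD []).length) && !pvCell G p.1 p.2

def adjB (p q : ℕ × ℕ) : Bool :=
  decide ((p.1 = q.1 ∧ (p.2 + 1 = q.2 ∨ q.2 + 1 = p.2)) ∨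
          (p.2 = q.2 ∧ (p.1 + 1 = q.1 ∨ q.1 + 1 = p.1)))

def StepR (G : List (List Bool)) (p q : ℕ × ℕ) : Prop :=
  empB G p = true ∧ empB G q = true ∧ adjB p q = true

def Reach (G : List (List Bool)) : ℕ × ℕ → ℕ × ℕ → Prop := Relation.ReflTransGen (StepR G)

def borderB (G : List (List Bool)) (p : ℕ × ℕ) : Bool :=
  decide (p.1 = 0 ∨ p.1 = G.length - 1 ∨ p.2 = 0 ∨ p.2 = (G.headD []).length - 1)

def Bad (G : List (List Bool)) (p : ℕ × ℕ) : Prop :=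
  ∃ b, empB G b = true ∧ borderB G b = true ∧ Reach G b p

def pvIter (G : List (List Bool)) (k : ℕ) : List (List Bool) :=
  (pvStep G G.length (G.headD []).length)^[k] (pvMark0 G G.length (G.headD []).length)

def markF (G : List (List Bool)) (p : ℕ × ℕ) : Bool :=
  pvMget (pvIter G (G.length * (G.headD []).length)) p.1 p.2

def Efin (G : List (List Bool)) : Finset (ℕ × ℕ) :=
  (Finset.range G.length ×ˢ Finset.range (G.headD []).length).filter fun p => empB G p = true

def cellsL (C : ℕ) (rs : List ℕ) : List (ℕ × ℕ) :=
  rs.flatMap fun r => (List.range C).map fun c => (r, c)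

-- pvEnum facts
theorem pvEnum_mem {α : Type} {xs : List α} {s : ℕ} {cc : ℕ × α} (d : α) (h : cc ∈ pvEnum xs s) :
    s ≤ cc.1 ∧ cc.1 < s + xs.length ∧ cc.2 = xs.getD (cc.1 - s) d := by
  induction xs generalizing s with
  | nil => simp [pvEnum] at h
  | cons x xs ih =>
    simp only [pvEnum, List.mem_cons] at h
    rcases h with h | h
    · subst h; simp
    · obtain ⟨h1, h2, h3⟩ := ih h
      refine ⟨by omega, by simp; omega, ?_⟩
      rw [h3]
      have hss : cc.1 - s = (cc.1 - (s+1)) + 1 := by omega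
      rw [hss, List.getD_cons_succ]

theorem pvEnum_mem_of {α : Type} (xs : List α) (s k : ℕ) (d : α) (hk : k < xs.length) :
    (s + k, xs.getD k d) ∈ pvEnum xs s := by
  induction xs generalizing s k with
  | nil => simp at hk
  | cons x xs ih =>
    cases k with
    | zero => simp [pvEnum]
    | succ k =>
      simp only [pvEnum, List.mem_cons]
      right
      have := ih (s+1) k (by simpa using Nat.lt_of_succ_lt_succ hk)
      have he : s + (k+1) = (s+1)+k := by omega
      rw [List.getD_cons_succ, he]
      exact this

-- marking lookups
theorem mget_map (rows cols : ℕ) (f : ℕ → ℕ → Bool) (r c : ℕ) :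
    pvMget ((List.range rows).map fun r => (List.range cols).map fun c => f r c) r c =
      if r < rows ∧ c < cols then f r c else false := by
  unfold pvMget
  rcases Nat.lt_or_ge r rows with hr | hr
  · rcases Nat.lt_or_ge c cols with hc | hc
    · simp [List.getD_eq_getElem?_getD, hr, hc]
    · simp [List.getD_eq_getElem?_getD, hr, hc]
  · simp [List.getD_eq_getElem?_getD, hr]

theorem foldl_const {α : Type} (f : α → α) (n : ℕ) (i : α) :
    (List.range n).foldl (fun m _ => f m) i = f^[n] i := by
  induction n generalizing i with
  | zero => simp
  | succ n ih =>
    rw [List.range_succ, List.foldl_append, Function.iterate_succ_apply']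
    simp only [List.foldl_cons, List.foldl_nil]
    rw [ih]

theorem iter_zero (G : List (List Bool)) : pvIter G 0 = pvMark0 G G.length (G.headD []).length := rfl

theorem iter_succ (G : List (List Bool)) (k : ℕ) :
    pvIter G (k + 1) = pvStep G G.length (G.headD []).length (pvIter G k) := by
  unfold pvIter
  rw [Function.iterate_succ_apply']

-- in-range / out-of-range marking formulas
theorem mget_mark0 (G : List (List Bool)) (r c : ℕ) (hr : r < G.length)
    (hc : c < (G.headD []).length) :
    pvMget (pvMark0 G G.length (G.headD []).length) r c =
      ((!pvCell G r c) && (decide (r = 0) || decide (r = G.length - 1) || decide (c = 0) ||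
        decide (c = (G.headD []).length - 1))) := by
  unfold pvMark0; rw [mget_map, if_pos (show r < G.length ∧ c < (G.headD []).length from ⟨hr, hc⟩)]

theorem mget_step (G : List (List Bool)) (R C : ℕ) (m : List (List Bool)) (r c : ℕ)
    (hr : r < R) (hc : c < C) :
    pvMget (pvStep G R C m) r c =
      (pvMget m r c || ((!pvCell G r c) &&
        ((decide (0 < r) && pvMget m (r - 1) c) ||
         (decide (r + 1 < R) && pvMget m (r + 1) c) ||
         (decide (0 < c) && pvMget m r (c - 1)) ||
         (decide (c + 1 < C) && pvMget m r (c + 1))))) := by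
  unfold pvStep; rw [mget_map, if_pos (show r < R ∧ c < C from ⟨hr, hc⟩)]

theorem mget_iter_oob (G : List (List Bool)) (k r c : ℕ)
    (h : ¬(r < G.length ∧ c < (G.headD []).length)) : pvMget (pvIter G k) r c = false := by
  cases k with
  | zero => rw [iter_zero]; unfold pvMark0; rw [mget_map, if_neg h]
  | succ k => rw [iter_succ]; unfold pvStep; rw [mget_map, if_neg h]

theorem iter_mono (G : List (List Bool)) {k r c : ℕ} (h : pvMget (pvIter G k) r c = true) :
    pvMget (pvIter G (k + 1)) r c = true := by
  by_cases hb : r < G.length ∧ c < (G.headD []).length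
  · rw [iter_succ, mget_step G _ _ _ r c hb.1 hb.2, h]; rfl
  · rw [mget_iter_oob G k r c hb] at h; cases h

theorem iter_mono_le (G : List (List Bool)) {k k' r c : ℕ} (hk : k ≤ k')
    (h : pvMget (pvIter G k) r c = true) : pvMget (pvIter G k') r c = true := by
  induction k' with
  | zero => have : k = 0 := by omega
            exact this ▸ h
  | succ k' ih =>
    rcases Nat.lt_or_ge k (k' + 1) with hlt | hge
    · exact iter_mono G (ih (by omega))
    · have : k = k' + 1 := by omega
      exact this ▸ h

theorem empB_intro (G : List (List Bool)) (r c : ℕ) (hr : r < G.length)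
    (hc : c < (G.headD []).length) (hcell : pvCell G r c = false) : empB G (r, c) = true := by
  unfold empB
  rw [hcell]
  rw [decide_eq_true hr, decide_eq_true hc]
  rfl

theorem empB_elim (G : List (List Bool)) {p : ℕ × ℕ} (h : empB G p = true) :
    p.1 < G.length ∧ p.2 < (G.headD []).length ∧ pvCell G p.1 p.2 = false := by
  unfold empB at h
  simp only [Bool.and_eq_true, decide_eq_true_eq, Bool.not_eq_eq_eq_not, Bool.not_true] at h
  exact ⟨h.1.1, h.1.2, h.2⟩

theorem iter_sound (G : List (List Bool)) :
    ∀ (k r c : ℕ), pvMget (pvIter G k) r c = true → empB G (r, c) = true ∧ Bad G (r, c) := by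
  intro k
  induction k with
  | zero =>
    intro r c h
    by_cases hb : r < G.length ∧ c < (G.headD []).length
    · rw [show pvIter G 0 = pvIter G 0 from rfl, iter_zero, mget_mark0 G r c hb.1 hb.2] at h
      simp only [Bool.and_eq_true, Bool.not_eq_eq_eq_not, Bool.not_true, Bool.or_eq_true,
        decide_eq_true_eq] at h
      have hemp : empB G (r, c) = true := empB_intro G r c hb.1 hb.2 h.1
      refine ⟨hemp, (r, c), hemp, ?_, Relation.ReflTransGen.refl⟩
      unfold borderB
      rw [decide_eq_true_eq]
      tauto
    · rw [mget_iter_oob G 0 r c hb] at h; cases h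
  | succ k ih =>
    intro r c h
    by_cases hb : r < G.length ∧ c < (G.headD []).length
    · rw [iter_succ, mget_step G _ _ _ r c hb.1 hb.2] at h
      simp only [Bool.or_eq_true, Bool.and_eq_true, Bool.not_eq_eq_eq_not, Bool.not_true,
        decide_eq_true_eq] at h
      rcases h with h | ⟨hcell, hnb⟩
      · exact ih r c h
      · have hemp : empB G (r, c) = true := empB_intro G r c hb.1 hb.2 hcell
        rcases hnb with ((⟨h0, hm⟩ | ⟨h0, hm⟩) | ⟨h0, hm⟩) | ⟨h0, hm⟩
        · obtain ⟨hq, b, hb1, hb2, hrch⟩ := ih _ _ hm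
          exact ⟨hemp, b, hb1, hb2, hrch.tail ⟨hq, hemp, by simp [adjB]; try omega⟩⟩
        · obtain ⟨hq, b, hb1, hb2, hrch⟩ := ih _ _ hm
          exact ⟨hemp, b, hb1, hb2, hrch.tail ⟨hq, hemp, by simp [adjB]; try omega⟩⟩
        · obtain ⟨hq, b, hb1, hb2, hrch⟩ := ih _ _ hm
          exact ⟨hemp, b, hb1, hb2, hrch.tail ⟨hq, hemp, by simp [adjB]; try omega⟩⟩
        · obtain ⟨hq, b, hb1, hb2, hrch⟩ := ih _ _ hm
          exact ⟨hemp, b, hb1, hb2, hrch.tail ⟨hq, hemp, by simp [adjB]; try omega⟩⟩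
    · rw [mget_iter_oob G (k+1) r c hb] at h; cases h

-- the marking stabilises within R*C sweeps
def Mk (G : List (List Bool)) (k : ℕ) : Finset (ℕ × ℕ) :=
  (Finset.range G.length ×ˢ Finset.range (G.headD []).length).filter fun p =>
    pvMget (pvIter G k) p.1 p.2 = true

theorem Mk_mono (G : List (List Bool)) (k : ℕ) : Mk G k ⊆ Mk G (k + 1) := by
  intro p hp
  simp only [Mk, Finset.mem_filter] at hp ⊢
  exact ⟨hp.1, iter_mono G hp.2⟩

theorem mget_eq_of_Mk_eq (G : List (List Bool)) {k : ℕ} (h : Mk G k = Mk G (k + 1)) :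
    ∀ r c, pvMget (pvIter G k) r c = pvMget (pvIter G (k + 1)) r c := by
  intro r c
  by_cases hb : r < G.length ∧ c < (G.headD []).length
  · have := Finset.ext_iff.mp h (r, c)
    simp only [Mk, Finset.mem_filter, Finset.mem_product, Finset.mem_range] at this
    by_cases h1 : pvMget (pvIter G k) r c = true <;>
      by_cases h2 : pvMget (pvIter G (k+1)) r c = true <;> simp_all
  · rw [mget_iter_oob G k r c hb, mget_iter_oob G (k+1) r c hb]

theorem step_ext (G : List (List Bool)) (R C : ℕ) (m m' : List (List Bool))
    (h : ∀ r c, pvMget m r c = pvMget m' r c) : pvStep G R C m = pvStep G R C m' := by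
  unfold pvStep
  apply List.map_congr_left; intro r _
  apply List.map_congr_left; intro c _
  rw [h r c, h (r-1) c, h (r+1) c, h r (c-1), h r (c+1)]

theorem iter_stab (G : List (List Bool)) {k : ℕ}
    (h : ∀ r c, pvMget (pvIter G k) r c = pvMget (pvIter G (k + 1)) r c) :
    ∀ j, k ≤ j → ∀ r c, pvMget (pvIter G j) r c = pvMget (pvIter G k) r c := by
  intro j
  induction j with
  | zero => intro hj r c; have : k = 0 := by omega
            rw [this]
  | succ j ih =>
    intro hj r c
    rcases Nat.lt_or_ge k (j + 1) with hlt | hge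
    · have hjk : k ≤ j := by omega
      have hlists : pvStep G G.length (G.headD []).length (pvIter G j) =
          pvStep G G.length (G.headD []).length (pvIter G k) :=
        step_ext _ _ _ _ _ (fun r c => ih hjk r c)
      rw [iter_succ, hlists, ← iter_succ, ← h r c]
    · have : k = j + 1 := by omega
      rw [this]

theorem iter_fix (G : List (List Bool)) :
    ∀ r c, pvMget (pvIter G (G.length * (G.headD []).length)) r c =
      pvMget (pvIter G (G.length * (G.headD []).length + 1)) r c := by
  by_cases hex : ∃ k, k < G.length * (G.headD []).length ∧ Mk G k = Mk G (k + 1)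
  · obtain ⟨k, hk, he⟩ := hex
    have hs := iter_stab G (mget_eq_of_Mk_eq G he)
    intro r c
    rw [hs (G.length * (G.headD []).length) (by omega) r c,
        hs (G.length * (G.headD []).length + 1) (by omega) r c]
  · push_neg at hex
    have hgrow : ∀ k, k ≤ G.length * (G.headD []).length → k ≤ (Mk G k).card := by
      intro k
      induction k with
      | zero => intro _; exact Nat.zero_le _
      | succ k ih =>
        intro hk
        have hss : Mk G k ⊂ Mk G (k + 1) :=
          Finset.ssubset_iff_subset_ne.mpr ⟨Mk_mono G k, hex k (by omega)⟩
        have := Finset.card_lt_card hss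
        have := ih (by omega)
        omega
    have hsub : (Mk G (G.length * (G.headD []).length)).card ≤ G.length * (G.headD []).length := by
      calc (Mk G (G.length * (G.headD []).length)).card
          ≤ ((Finset.range G.length) ×ˢ (Finset.range (G.headD []).length)).card :=
            Finset.card_le_card (Finset.filter_subset _ _)
        _ = G.length * (G.headD []).length := by
            rw [Finset.card_product, Finset.card_range, Finset.card_range]
    have hfull : Mk G (G.length * (G.headD []).length) =
        (Finset.range G.length) ×ˢ (Finset.range (G.headD []).length) := by
      apply Finset.eq_of_subset_of_card_le (Finset.filter_subset _ _)
      have hge := hgrow (G.length * (G.headD []).length) (le_refl _)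
      rw [Finset.card_product, Finset.card_range, Finset.card_range]
      exact hge
    have hfull1 : Mk G (G.length * (G.headD []).length + 1) =
        (Finset.range G.length) ×ˢ (Finset.range (G.headD []).length) := by
      apply Finset.eq_of_subset_of_card_le (Finset.filter_subset _ _)
      have h1 := Finset.card_le_card (Mk_mono G (G.length * (G.headD []).length))
      rw [hfull] at h1
      exact h1
    exact mget_eq_of_Mk_eq G (hfull.trans hfull1.symm)

theorem markF_sound (G : List (List Bool)) (p : ℕ × ℕ) (h : markF G p = true) :
    empB G p = true ∧ Bad G p := by
  have := iter_sound G (G.length * (G.headD []).length) p.1 p.2 h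
  simpa using this

theorem marked_of_nbr (G : List (List Bool)) {p q : ℕ × ℕ} (hp : empB G p = true)
    (hq : markF G q = true) (hadj : adjB q p = true) : markF G p = true := by
  obtain ⟨p1, p2⟩ := p
  obtain ⟨q1, q2⟩ := q
  have hb := empB_elim G hp
  simp only at hb
  have hqb : q1 < G.length ∧ q2 < (G.headD []).length := by
    by_contra hcon
    rw [show markF G (q1, q2) = pvMget (pvIter G (G.length * (G.headD []).length)) q1 q2 from rfl,
      mget_iter_oob G _ q1 q2 hcon] at hq
    cases hq
  unfold markF at hq ⊢
  simp only at hq ⊢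
  rw [iter_fix G p1 p2, iter_succ, mget_step G _ _ _ p1 p2 hb.1 hb.2.1]
  simp only [adjB, decide_eq_true_eq] at hadj
  simp only [Bool.or_eq_true, Bool.and_eq_true, Bool.not_eq_eq_eq_not, Bool.not_true,
    decide_eq_true_eq]
  right
  refine ⟨hb.2.2, ?_⟩
  rcases hadj with ⟨h1, h2 | h2⟩ | ⟨h1, h2 | h2⟩
  · -- q2 + 1 = p2 : q is the left neighbour
    left; right
    refine ⟨by omega, ?_⟩
    have e1 : p1 = q1 := by omega
    have e2 : p2 - 1 = q2 := by omega
    rw [e1, e2]; exact hq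
  · -- p2 + 1 = q2 : q is the right neighbour
    right
    refine ⟨by omega, ?_⟩
    have e1 : p1 = q1 := by omega
    have e2 : p2 + 1 = q2 := by omega
    rw [e1, e2]; exact hq
  · -- q1 + 1 = p1 : q is the upper neighbour
    left; left; left
    refine ⟨by omega, ?_⟩
    have e1 : p1 - 1 = q1 := by omega
    have e2 : p2 = q2 := by omega
    rw [e1, e2]; exact hq
  · -- p1 + 1 = q1 : q is the lower neighbour
    left; left; right
    refine ⟨by omega, ?_⟩
    have e1 : p1 + 1 = q1 := by omega
    have e2 : p2 = q2 := by omega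
    rw [e1, e2]; exact hq

theorem markF_complete (G : List (List Bool)) {p : ℕ × ℕ} (hbad : Bad G p) :
    markF G p = true := by
  obtain ⟨b, hb1, hb2, hr⟩ := hbad
  induction hr with
  | refl =>
    have hbb : b.1 < G.length ∧ b.2 < (G.headD []).length ∧ pvCell G b.1 b.2 = false :=
      empB_elim G hb1
    unfold markF
    apply iter_mono_le G (Nat.zero_le _)
    rw [iter_zero, mget_mark0 G b.1 b.2 hbb.1 hbb.2.1]
    unfold borderB at hb2
    rw [decide_eq_true_eq] at hb2
    rw [hbb.2.2]
    simp only [Bool.not_false, Bool.true_and, Bool.or_eq_true, decide_eq_true_eq]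
    tauto
  | tail hab hbc ih =>
    exact marked_of_nbr G hbc.2.1 ih hbc.2.2

theorem markF_char (G : List (List Bool)) (p : ℕ × ℕ) :
    markF G p = true ↔ (empB G p = true ∧ Bad G p) :=
  ⟨markF_sound G p, fun h => markF_complete G h.2⟩

theorem stepR_symm (G : List (List Bool)) {p q : ℕ × ℕ} (h : StepR G p q) : StepR G q p := by
  refine ⟨h.2.1, h.1, ?_⟩
  have := h.2.2
  simp only [adjB, decide_eq_true_eq] at this ⊢
  omega

theorem reach_symm (G : List (List Bool)) {p q : ℕ × ℕ} (h : Reach G p q) : Reach G q p := by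
  induction h with
  | refl => exact Relation.ReflTransGen.refl
  | tail hab hbc ih => exact Relation.ReflTransGen.head (stepR_symm G hbc) ih

theorem reach_closed (G : List (List Bool)) {V : List (ℕ × ℕ)}
    (hcl : ∀ x ∈ V, ∀ y, StepR G x y → y ∈ V) {a b : ℕ × ℕ} (h : Reach G a b) (ha : a ∈ V) :
    b ∈ V := by
  induction h with
  | refl => exact ha
  | tail hab hbc ih => exact hcl _ ih _ hbc

theorem reach_emp (G : List (List Bool)) {a b : ℕ × ℕ} (ha : empB G a = true)
    (h : Reach G a b) : empB G b = true := by
  induction h with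
  | refl => exact ha
  | tail hab hbc ih => exact hbc.2.1

theorem mem_nbrs {R C : ℕ} {p y : ℕ × ℕ} :
    y ∈ pvNbrs R C p ↔ ((0 < p.1 ∧ y = (p.1 - 1, p.2)) ∨ (p.1 + 1 < R ∧ y = (p.1 + 1, p.2)) ∨
      (0 < p.2 ∧ y = (p.1, p.2 - 1)) ∨ (p.2 + 1 < C ∧ y = (p.1, p.2 + 1))) := by
  unfold pvNbrs
  by_cases h1 : 0 < p.1 <;> by_cases h2 : p.1 + 1 < R <;> by_cases h3 : 0 < p.2 <;>
    by_cases h4 : p.2 + 1 < C <;> simp [h1, h2, h3, h4]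

theorem nbrs_bound {R C : ℕ} {p y : ℕ × ℕ} (hp1 : p.1 < R) (hp2 : p.2 < C)
    (hy : y ∈ pvNbrs R C p) : y.1 < R ∧ y.2 < C := by
  rw [mem_nbrs] at hy
  rcases hy with ⟨h, e⟩ | ⟨h, e⟩ | ⟨h, e⟩ | ⟨h, e⟩ <;> subst e <;> constructor <;> simp <;> omega

theorem nbrs_len (R C : ℕ) (p : ℕ × ℕ) : (pvNbrs R C p).length ≤ 4 := by
  unfold pvNbrs; split_ifs <;> simp

theorem nbrs_of_step (G : List (List Bool)) {p y : ℕ × ℕ} (h : StepR G p y) :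
    y ∈ pvNbrs G.length (G.headD []).length p := by
  have hyb := empB_elim G h.2.1
  have hadj := h.2.2
  simp only [adjB, decide_eq_true_eq] at hadj
  rw [mem_nbrs]
  obtain ⟨p1, p2⟩ := p
  obtain ⟨y1, y2⟩ := y
  simp only at hadj hyb ⊢
  rcases hadj with ⟨h1, h2 | h2⟩ | ⟨h1, h2 | h2⟩
  · right; right; right
    exact ⟨by omega, by simp; omega⟩
  · right; right; left
    exact ⟨by omega, by simp; omega⟩
  · right; left
    exact ⟨by omega, by simp; omega⟩
  · left
    exact ⟨by omega, by simp; omega⟩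

theorem step_of_nbr (G : List (List Bool)) {p y : ℕ × ℕ} (hp : empB G p = true)
    (hy : y ∈ pvNbrs G.length (G.headD []).length p) (hye : empB G y = true) : StepR G p y := by
  refine ⟨hp, hye, ?_⟩
  rw [mem_nbrs] at hy
  simp only [adjB, decide_eq_true_eq]
  obtain ⟨p1, p2⟩ := p
  obtain ⟨y1, y2⟩ := y
  simp only [Prod.mk.injEq] at hy ⊢
  rcases hy with ⟨h, e1, e2⟩ | ⟨h, e1, e2⟩ | ⟨h, e1, e2⟩ | ⟨h, e1, e2⟩ <;> omega

theorem Efin_card_le (G : List (List Bool)) :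
    (Efin G).card ≤ G.length * (G.headD []).length := by
  calc (Efin G).card ≤ ((Finset.range G.length) ×ˢ (Finset.range (G.headD []).length)).card :=
        Finset.card_le_card (Finset.filter_subset _ _)
    _ = G.length * (G.headD []).length := by
        rw [Finset.card_product, Finset.card_range, Finset.card_range]

theorem mem_Efin (G : List (List Bool)) {p : ℕ × ℕ} :
    p ∈ Efin G ↔ empB G p = true := by
  unfold Efin
  simp only [Finset.mem_filter, Finset.mem_product, Finset.mem_range]
  constructor
  · exact fun h => h.2
  · intro h
    have := empB_elim G h
    exact ⟨⟨this.1, this.2.1⟩, h⟩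

-- list counting helpers
theorem countP_cells {α : Type} (g : ℕ → α) (C : ℕ) (rs : List ℕ) (f : ℕ × ℕ → Bool) :
    (cellsL C rs).countP f = (rs.map fun r => (List.range C).countP fun c => f (r, c)).sum := by
  induction rs with
  | nil => simp [cellsL]
  | cons r rs ih =>
    simp only [cellsL, List.flatMap_cons, List.countP_append, List.map_cons, List.sum_cons]
    rw [List.countP_map]
    simp only [cellsL] at ih
    rw [ih]
    rfl

theorem mem_cellsL {C : ℕ} {rs : List ℕ} {p : ℕ × ℕ} :
    p ∈ cellsL C rs ↔ p.1 ∈ rs ∧ p.2 < C := by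
  unfold cellsL
  simp only [List.mem_flatMap, List.mem_map, List.mem_range]
  constructor
  · rintro ⟨r, hr, c, hc, he⟩
    subst he; exact ⟨hr, hc⟩
  · intro ⟨h1, h2⟩
    exact ⟨p.1, h1, p.2, h2, rfl⟩

theorem nodup_cellsL {C : ℕ} {rs : List ℕ} (h : rs.Nodup) : (cellsL C rs).Nodup := by
  induction rs with
  | nil => simp [cellsL]
  | cons r rs ih =>
    simp only [cellsL, List.flatMap_cons]
    rw [List.nodup_append]
    refine ⟨?_, ih (List.Nodup.of_cons h), ?_⟩
    · exact (List.nodup_range).map (fun a b hab => by simpa using hab)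
    · intro x hx y hy
      intro he
      subst he
      simp only [List.mem_map, List.mem_range] at hx
      obtain ⟨c, _, he⟩ := hx
      have hm := (mem_cellsL (rs := rs)).mp hy
      rw [← he] at hm
      simp only at hm
      simp only [List.nodup_cons] at h
      exact h.1 hm.1

theorem countP_split {α : Type} (l : List α) (f : α → Bool) :
    l.countP f + l.countP (fun a => !f a) = l.length := by
  induction l with
  | nil => simp
  | cons x l ih =>
    by_cases hx : f x = true <;>
      simp [List.countP_cons, hx] <;> omega

theorem bfs_go (G : List (List Bool)) (p0 : ℕ × ℕ) (V0 : List (ℕ × ℕ))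
    (hp0emp : empB G p0 = true)
    (hV0cl : ∀ x ∈ V0, ∀ y, StepR G x y → y ∈ V0) :
    ∀ (fuel : ℕ) (q V A : List (ℕ × ℕ)),
      V = V0 ++ A →
      A.Nodup →
      (∀ x ∈ A, empB G x = true ∧ Reach G p0 x) →
      (∀ x ∈ q, x.1 < G.length ∧ x.2 < (G.headD []).length) →
      (∀ x ∈ q, empB G x = true → Reach G p0 x) →
      (∀ x ∈ A, ∀ y, StepR G x y → y ∈ V ∨ y ∈ q) →
      (p0 ∈ V ∨ p0 ∈ q) →
      q.length + 4 * ((Efin G \ V.toFinset).card) ≤ fuel →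
      ∃ A2, pvBfs G G.length (G.headD []).length fuel q V A = (V ++ A2, A ++ A2) ∧
        (A ++ A2).Nodup ∧
        (∀ x ∈ A ++ A2, empB G x = true ∧ Reach G p0 x) ∧
        (∀ x ∈ A ++ A2, ∀ y, StepR G x y → y ∈ V ++ A2) ∧
        p0 ∈ V ++ A2 := by
  intro fuel
  induction fuel with
  | zero =>
    intro q V A hVA hnd hA h4 h5 h6 h7 hfuel
    have hq : q = [] := by
      cases q with
      | nil => rfl
      | cons a q' => simp at hfuel
    subst hq
    refine ⟨[], by simp [pvBfs], by simpa using hnd, by simpa using hA, ?_, ?_⟩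
    · intro x hx y hstep
      simp only [List.append_nil] at hx ⊢
      rcases h6 x hx y hstep with h | h
      · exact h
      · cases h
    · simp only [List.append_nil]
      rcases h7 with h | h
      · exact h
      · cases h
  | succ f ih =>
    intro q V A hVA hnd hA h4 h5 h6 h7 hfuel
    cases q with
    | nil =>
      refine ⟨[], by simp [pvBfs], by simpa using hnd, by simpa using hA, ?_, ?_⟩
      · intro x hx y hstep
        simp only [List.append_nil] at hx ⊢
        rcases h6 x hx y hstep with h | h
        · exact h
        · cases h
      · simp only [List.append_nil]
        rcases h7 with h | h
        · exact h
        · cases h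
    | cons p q' =>
      rw [show pvBfs G G.length (G.headD []).length (f+1) (p :: q') V A =
        (if pvCell G p.1 p.2 then pvBfs G G.length (G.headD []).length f q' V A
         else if p ∈ V then pvBfs G G.length (G.headD []).length f q' V A
         else pvBfs G G.length (G.headD []).length f
           (q' ++ pvNbrs G.length (G.headD []).length p) (V ++ [p]) (A ++ [p])) from rfl]
      by_cases hcell : pvCell G p.1 p.2 = true
      · rw [if_pos hcell]
        apply ih q' V A hVA hnd hA (fun x hx => h4 x (List.mem_cons_of_mem _ hx))
          (fun x hx => h5 x (List.mem_cons_of_mem _ hx))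
        · intro x hx y hstep
          rcases h6 x hx y hstep with h | h
          · exact Or.inl h
          · rcases List.mem_cons.mp h with he | h
            · exfalso
              have := (empB_elim G hstep.2.1).2.2
              rw [← he] at hcell
              rw [this] at hcell
              cases hcell
            · exact Or.inr h
        · rcases h7 with h | h
          · exact Or.inl h
          · rcases List.mem_cons.mp h with he | h
            · exfalso
              have := (empB_elim G hp0emp).2.2
              rw [he] at this
              rw [this] at hcell
              cases hcell
            · exact Or.inr h
        · simp only [List.length_cons] at hfuel
          omega
      · rw [if_neg hcell]
        have hcell' : pvCell G p.1 p.2 = false := by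
          cases hc : pvCell G p.1 p.2
          · rfl
          · exact absurd hc hcell
        by_cases hmem : p ∈ V
        · rw [if_pos hmem]
          apply ih q' V A hVA hnd hA (fun x hx => h4 x (List.mem_cons_of_mem _ hx))
            (fun x hx => h5 x (List.mem_cons_of_mem _ hx))
          · intro x hx y hstep
            rcases h6 x hx y hstep with h | h
            · exact Or.inl h
            · rcases List.mem_cons.mp h with he | h
              · exact Or.inl (he ▸ hmem)
              · exact Or.inr h
          · rcases h7 with h | h
            · exact Or.inl h
            · rcases List.mem_cons.mp h with he | h
              · exact Or.inl (he ▸ hmem)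
              · exact Or.inr h
          · simp only [List.length_cons] at hfuel
            omega
        · rw [if_neg hmem]
          have hpb := h4 p (List.mem_cons_self)
          have hpemp : empB G p = true := by
            have := empB_intro G p.1 p.2 hpb.1 hpb.2 hcell'
            simpa using this
          have hreachp : Reach G p0 p := h5 p (List.mem_cons_self) hpemp
          have hpA : p ∉ A := fun hc => hmem (hVA ▸ List.mem_append_right V0 hc)
          have hpE : p ∈ Efin G := (mem_Efin G).mpr hpemp
          have hsd : Efin G \ (V ++ [p]).toFinset = (Efin G \ V.toFinset).erase p := by
            ext x
            simp only [Finset.mem_sdiff, Finset.mem_erase, List.mem_toFinset, List.mem_append,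
              List.mem_singleton]
            tauto
          have hpD : p ∈ Efin G \ V.toFinset := by
            rw [Finset.mem_sdiff]
            exact ⟨hpE, fun hc => hmem (List.mem_toFinset.mp hc)⟩
          have hcard : ((Efin G \ V.toFinset).erase p).card + 1 = (Efin G \ V.toFinset).card :=
            Finset.card_erase_add_one hpD
          obtain ⟨A2, hres, hnd2, hA2, hcl2, hp02⟩ :=
            ih (q' ++ pvNbrs G.length (G.headD []).length p) (V ++ [p]) (A ++ [p])
              (by rw [hVA, List.append_assoc])
              (by
                rw [List.nodup_append]
                refine ⟨hnd, List.nodup_singleton p, ?_⟩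
                intro a ha b hb he
                rw [List.mem_singleton.mp hb] at he
                exact hpA (he ▸ ha))
              (by
                intro x hx
                rcases List.mem_append.mp hx with h | h
                · exact hA x h
                · rw [List.mem_singleton.mp h]
                  exact ⟨hpemp, hreachp⟩)
              (by
                intro x hx
                rcases List.mem_append.mp hx with h | h
                · exact h4 x (List.mem_cons_of_mem _ h)
                · exact nbrs_bound hpb.1 hpb.2 h)
              (by
                intro x hx hxe
                rcases List.mem_append.mp hx with h | h
                · exact h5 x (List.mem_cons_of_mem _ h) hxe
                · exact hreachp.tail (step_of_nbr G hpemp h hxe))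
              (by
                intro x hx y hstep
                rcases List.mem_append.mp hx with h | h
                · rcases h6 x h y hstep with hv | hq
                  · exact Or.inl (List.mem_append_left _ hv)
                  · rcases List.mem_cons.mp hq with he | hq'
                    · exact Or.inl (List.mem_append_right _ (by simp [he]))
                    · exact Or.inr (List.mem_append_left _ hq')
                · rw [List.mem_singleton.mp h] at hstep
                  exact Or.inr (List.mem_append_right _ (nbrs_of_step G hstep)))
              (by
                rcases h7 with h | h
                · exact Or.inl (List.mem_append_left _ h)
                · rcases List.mem_cons.mp h with he | h
                  · exact Or.inl (List.mem_append_right _ (by simp [he]))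
                  · exact Or.inr (List.mem_append_left _ h))
              (by
                rw [hsd]
                have hlen := nbrs_len G.length ((G.headD []).length) p
                simp only [List.length_append, List.length_cons] at hfuel ⊢
                omega)
          refine ⟨p :: A2, ?_, ?_, ?_, ?_, ?_⟩
          · rw [hres]
            simp [List.append_assoc]
          · have : A ++ p :: A2 = (A ++ [p]) ++ A2 := by simp
            rw [this]
            exact hnd2
          · intro x hx
            apply hA2
            rcases List.mem_append.mp hx with h | h
            · exact List.mem_append_left _ (List.mem_append_left _ h)
            · rcases List.mem_cons.mp h with he | h
              · exact List.mem_append_left _ (List.mem_append_right _ (by simp [he]))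
              · exact List.mem_append_right _ h
          · intro x hx y hstep
            have hx' : x ∈ (A ++ [p]) ++ A2 := by
              rcases List.mem_append.mp hx with h | h
              · exact List.mem_append_left _ (List.mem_append_left _ h)
              · rcases List.mem_cons.mp h with he | h
                · exact List.mem_append_left _ (List.mem_append_right _ (by simp [he]))
                · exact List.mem_append_right _ h
            have := hcl2 x hx' y hstep
            rcases List.mem_append.mp this with h | h
            · rcases List.mem_append.mp h with h | h
              · exact List.mem_append_left _ h
              · exact List.mem_append_right _ (List.mem_cons.mpr (Or.inl (List.mem_singleton.mp h)))
            · exact List.mem_append_right _ (List.mem_cons_of_mem _ h)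
          · rcases List.mem_append.mp hp02 with h | h
            · rcases List.mem_append.mp h with h | h
              · exact List.mem_append_left _ h
              · exact List.mem_append_right _ (List.mem_cons.mpr (Or.inl (List.mem_singleton.mp h)))
            · exact List.mem_append_right _ (List.mem_cons_of_mem _ h)

theorem bfs_run (G : List (List Bool)) (V0 : List (ℕ × ℕ))
    (hV0cl : ∀ x ∈ V0, ∀ y, StepR G x y → y ∈ V0)
    (p0 : ℕ × ℕ) (hp0emp : empB G p0 = true) (hp0V0 : p0 ∉ V0) :
    ∃ Ac, pvBfs G G.length (G.headD []).length (4 * (G.length * (G.headD []).length) + 1)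
        [p0] V0 [] = (V0 ++ Ac, Ac) ∧ Ac.Nodup ∧ (∀ x, x ∈ Ac ↔ Reach G p0 x) := by
  have hb := empB_elim G hp0emp
  obtain ⟨A2, hres, hnd2, hA2, hcl2, hp02⟩ :=
    bfs_go G p0 V0 hp0emp hV0cl (4 * (G.length * (G.headD []).length) + 1) [p0] V0 []
      (by simp) (by simp) (by simp)
      (by intro x hx; rw [List.mem_singleton.mp hx]; exact ⟨hb.1, hb.2.1⟩)
      (by
        intro x hx _
        rw [List.mem_singleton.mp hx]
        exact Relation.ReflTransGen.refl)
      (by simp) (by simp)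
      (by
        have h1 := Finset.card_le_card (Finset.sdiff_subset (s := Efin G) (t := V0.toFinset))
        have h2 := Efin_card_le G
        simp only [List.length_singleton]
        omega)
  simp only [List.nil_append] at hres hnd2 hA2 hcl2 hp02
  have hdisj : ∀ x ∈ A2, x ∉ V0 := by
    intro x hx hxV0
    exact hp0V0 (reach_closed G hV0cl (reach_symm G (hA2 x hx).2) hxV0)
  have hp0A2 : p0 ∈ A2 := by
    rcases List.mem_append.mp hp02 with h | h
    · exact absurd h hp0V0
    · exact h
  refine ⟨A2, hres, hnd2, ?_⟩
  intro x
  constructor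
  · exact fun hx => (hA2 x hx).2
  · intro hreach
    induction hreach with
    | refl => exact hp0A2
    | tail hab hbc ihr =>
      rcases List.mem_append.mp (hcl2 _ ihr _ hbc) with h | h
      · exact absurd
          (reach_closed G hV0cl (reach_symm G (Relation.ReflTransGen.tail hab hbc)) h) hp0V0
      · exact h

theorem border_iff (G : List (List Bool)) {x : ℕ × ℕ} (hx : empB G x = true) :
    (decide (0 < (x.1 : Int) ∧ (x.1 : Int) < (G.length : Int) - 1 ∧
      0 < (x.2 : Int) ∧ (x.2 : Int) < ((G.headD []).length : Int) - 1)) = !borderB G x := by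
  have hb := empB_elim G hx
  unfold borderB
  by_cases hp : (0 < (x.1 : Int) ∧ (x.1 : Int) < (G.length : Int) - 1 ∧
      0 < (x.2 : Int) ∧ (x.2 : Int) < ((G.headD []).length : Int) - 1)
  · rw [decide_eq_true hp]
    have hnb : ¬(x.1 = 0 ∨ x.1 = G.length - 1 ∨ x.2 = 0 ∨ x.2 = (G.headD []).length - 1) := by
      omega
    rw [decide_eq_false hnb]
    rfl
  · rw [decide_eq_false hp]
    have hbd : (x.1 = 0 ∨ x.1 = G.length - 1 ∨ x.2 = 0 ∨ x.2 = (G.headD []).length - 1) := by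
      omega
    rw [decide_eq_true hbd]
    rfl

theorem row_go (G : List (List Bool)) (r : ℕ) :
    ∀ (l : List (ℕ × Bool)) (V : List (ℕ × ℕ)) (areas : List (List (ℕ × ℕ))),
      (∀ cc ∈ l, cc.2 = pvCell G r cc.1 ∧ cc.1 < (G.headD []).length ∧ r < G.length) →
      (∀ x ∈ V, empB G x = true) →
      (∀ x ∈ V, ∀ y, StepR G x y → y ∈ V) →
      V.Nodup →
      ((areas.map List.length).sum = (V.filter fun p => !markF G p).length) →
      ∃ V2 areas2, pvRowLoop G G.length (G.headD []).length r l V areas = (V2, areas2) ∧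
        (∀ x ∈ V2, empB G x = true) ∧ (∀ x ∈ V2, ∀ y, StepR G x y → y ∈ V2) ∧ V2.Nodup ∧
        ((areas2.map List.length).sum = (V2.filter fun p => !markF G p).length) ∧
        (∀ x ∈ V, x ∈ V2) ∧
        (∀ cc ∈ l, pvCell G r cc.1 = false → (r, cc.1) ∈ V2) := by
  intro l
  induction l with
  | nil =>
    intro V areas _ hVemp hVcl hVnd hsum
    exact ⟨V, areas, rfl, hVemp, hVcl, hVnd, hsum, fun x hx => hx, by simp⟩
  | cons cc rest ih =>
    intro V areas hl hVemp hVcl hVnd hsum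
    obtain ⟨c, cell⟩ := cc
    have hhead := hl (c, cell) List.mem_cons_self
    simp only at hhead
    rw [show pvRowLoop G G.length (G.headD []).length r ((c, cell) :: rest) V areas =
      (if cell then pvRowLoop G G.length (G.headD []).length r rest V areas
       else if (r, c) ∈ V then pvRowLoop G G.length (G.headD []).length r rest V areas
       else
         pvRowLoop G G.length (G.headD []).length r rest
           (pvBfs G G.length (G.headD []).length (4 * (G.length * (G.headD []).length) + 1)
             [(r, c)] V []).1
           (if pvInterior G.length (G.headD []).length
               (pvBfs G G.length (G.headD []).length (4 * (G.length * (G.headD []).length) + 1)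
                 [(r, c)] V []).2 then
              areas ++ [(pvBfs G G.length (G.headD []).length
                (4 * (G.length * (G.headD []).length) + 1) [(r, c)] V []).2]
            else areas)) from rfl]
    by_cases hcell : cell = true
    · rw [if_pos hcell]
      obtain ⟨V2, areas2, hres, a1, a2, a3, a4, a5, a6⟩ :=
        ih V areas (fun x hx => hl x (List.mem_cons_of_mem _ hx)) hVemp hVcl hVnd hsum
      refine ⟨V2, areas2, hres, a1, a2, a3, a4, a5, ?_⟩
      intro dd hdd hpc
      rcases List.mem_cons.mp hdd with he | hdd'
      · exfalso
        rw [he] at hpc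
        simp only at hpc
        rw [← hhead.1, hcell] at hpc
        cases hpc
      · exact a6 dd hdd' hpc
    · have hcellf : cell = false := by
        cases cell
        · rfl
        · exact absurd rfl hcell
      rw [if_neg hcell]
      by_cases hv : (r, c) ∈ V
      · rw [if_pos hv]
        obtain ⟨V2, areas2, hres, a1, a2, a3, a4, a5, a6⟩ :=
          ih V areas (fun x hx => hl x (List.mem_cons_of_mem _ hx)) hVemp hVcl hVnd hsum
        refine ⟨V2, areas2, hres, a1, a2, a3, a4, a5, ?_⟩
        intro dd hdd hpc
        rcases List.mem_cons.mp hdd with he | hdd'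
        · rw [he]
          exact a5 _ hv
        · exact a6 dd hdd' hpc
      · rw [if_neg hv]
        have hpc : pvCell G r c = false := by rw [← hhead.1, hcellf]
        have hemp : empB G (r, c) = true := empB_intro G r c hhead.2.2 hhead.2.1 hpc
        obtain ⟨Ac, hres, hAnd, hiff⟩ := bfs_run G V hVcl (r, c) hemp hv
        rw [hres]
        have hAemp : ∀ x ∈ Ac, empB G x = true :=
          fun x hx => reach_emp G hemp ((hiff x).mp hx)
        have hdisj : ∀ x ∈ Ac, x ∉ V := by
          intro x hx hxV
          exact hv (reach_closed G hVcl (reach_symm G ((hiff x).mp hx)) hxV)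
        have hV'emp : ∀ x ∈ V ++ Ac, empB G x = true := by
          intro x hx
          rcases List.mem_append.mp hx with h | h
          · exact hVemp x h
          · exact hAemp x h
        have hV'cl : ∀ x ∈ V ++ Ac, ∀ y, StepR G x y → y ∈ V ++ Ac := by
          intro x hx y hstep
          rcases List.mem_append.mp hx with h | h
          · exact List.mem_append_left _ (hVcl x h y hstep)
          · exact List.mem_append_right _
              ((hiff y).mpr (Relation.ReflTransGen.tail ((hiff x).mp h) hstep))
        have hV'nd : (V ++ Ac).Nodup := by
          rw [List.nodup_append]
          refine ⟨hVnd, hAnd, ?_⟩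
          intro a ha b hb he
          exact hdisj b hb (he ▸ ha)
        have hsum' : (((if pvInterior G.length (G.headD []).length Ac then areas ++ [Ac]
            else areas).map List.length).sum =
            ((V ++ Ac).filter fun p => !markF G p).length) := by
          rw [List.filter_append, List.length_append]
          by_cases hkeep : pvInterior G.length (G.headD []).length Ac = true
          · rw [if_pos hkeep]
            have hnone : ∀ x ∈ Ac, markF G x = false := by
              intro x hx
              cases hm : markF G x
              · rfl
              · exfalso
                obtain ⟨_, b, hbemp, hbbord, hbreach⟩ := (markF_char G x).mp hm
                have hbAc : b ∈ Ac :=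
                  (hiff b).mpr (Relation.ReflTransGen.trans ((hiff x).mp hx)
                    (reach_symm G hbreach))
                unfold pvInterior at hkeep
                rw [List.all_eq_true] at hkeep
                have := hkeep b hbAc
                rw [border_iff G (hAemp b hbAc), hbbord] at this
                cases this
            have hfe : (Ac.filter fun p => !markF G p) = Ac := by
              rw [List.filter_eq_self]
              intro a ha
              rw [hnone a ha]
              rfl
            rw [hfe, List.map_append, List.sum_append, hsum]
            simp
          · rw [if_neg hkeep]
            have hkf : pvInterior G.length (G.headD []).length Ac = false := by
              cases hk : pvInterior G.length (G.headD []).length Ac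
              · rfl
              · exact absurd hk hkeep
            unfold pvInterior at hkf
            rw [List.all_eq_false] at hkf
            obtain ⟨x0, hx0, hx0f⟩ := hkf
            have hx0f' := Bool.eq_false_iff.mpr hx0f
            have hbord : borderB G x0 = true := by
              have := border_iff G (hAemp x0 hx0)
              rw [hx0f'] at this
              cases hbb : borderB G x0
              · rw [hbb] at this
                cases this
              · rfl
            have hall : ∀ y ∈ Ac, markF G y = true := by
              intro y hy
              exact (markF_char G y).mpr ⟨hAemp y hy,
                x0, hAemp x0 hx0, hbord,
                Relation.ReflTransGen.trans (reach_symm G ((hiff x0).mp hx0)) ((hiff y).mp hy)⟩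
            have hfe : (Ac.filter fun p => !markF G p) = [] := by
              rw [List.filter_eq_nil_iff]
              intro a ha
              rw [hall a ha]
              simp
            rw [hfe, hsum]
            simp
        obtain ⟨V2, areas2, hres2, a1, a2, a3, a4, a5, a6⟩ :=
          ih (V ++ Ac) _ (fun x hx => hl x (List.mem_cons_of_mem _ hx)) hV'emp hV'cl hV'nd hsum'
        refine ⟨V2, areas2, hres2, a1, a2, a3, a4, ?_, ?_⟩
        · exact fun x hx => a5 x (List.mem_append_left _ hx)
        · intro dd hdd hpc2
          rcases List.mem_cons.mp hdd with he | hdd'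
          · rw [he]
            simp only
            exact a5 _ (List.mem_append_right _ ((hiff (r, c)).mpr Relation.ReflTransGen.refl))
          · exact a6 dd hdd' hpc2

theorem rows_go (G : List (List Bool)) (hpre : Pre_calculate_internal_area G) :
    ∀ (l : List (ℕ × List Bool)) (V : List (ℕ × ℕ)) (areas : List (List (ℕ × ℕ))),
      (∀ rr ∈ l, rr.2 = G.getD rr.1 [] ∧ rr.1 < G.length) →
      (∀ x ∈ V, empB G x = true) →
      (∀ x ∈ V, ∀ y, StepR G x y → y ∈ V) →
      V.Nodup →
      ((areas.map List.length).sum = (V.filter fun p => !markF G p).length) →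
      ∃ (V2 : List (ℕ × ℕ)) (areas2 : List (List (ℕ × ℕ))),
      pvRowsLoop G G.length (G.headD []).length l V areas = areas2 ∧
        (∀ x ∈ V2, empB G x = true) ∧ V2.Nodup ∧
        ((areas2.map List.length).sum = (V2.filter fun p => !markF G p).length) ∧
        (∀ x ∈ V, x ∈ V2) ∧
        (∀ rr ∈ l, ∀ c, c < rr.2.length → pvCell G rr.1 c = false → (rr.1, c) ∈ V2) := by
  intro l
  induction l with
  | nil =>
    intro V areas _ hVemp _ hVnd hsum
    exact ⟨V, areas, rfl, hVemp, hVnd, hsum, fun x hx => hx, by simp⟩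
  | cons rr rest ih =>
    intro V areas hl hVemp hVcl hVnd hsum
    obtain ⟨r, row⟩ := rr
    have hhead := hl (r, row) List.mem_cons_self
    simp only at hhead
    have hrowlen : row.length = (G.headD []).length := by
      rw [hhead.1, List.getD_eq_getElem G [] hhead.2]
      exact hpre _ (List.getElem_mem hhead.2)
    rw [show pvRowsLoop G G.length (G.headD []).length ((r, row) :: rest) V areas =
      pvRowsLoop G G.length (G.headD []).length rest
        (pvRowLoop G G.length (G.headD []).length r (pvEnum row 0) V areas).1
        (pvRowLoop G G.length (G.headD []).length r (pvEnum row 0) V areas).2 from rfl]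
    obtain ⟨Vm, areasm, hresm, m1, m2, m3, m4, m5, m6⟩ :=
      row_go G r (pvEnum row 0) V areas
        (by
          intro cc hcc
          obtain ⟨h1, h2, h3⟩ := pvEnum_mem true hcc
          rw [Nat.sub_zero] at h3
          rw [Nat.zero_add] at h2
          refine ⟨?_, by omega, hhead.2⟩
          rw [h3, hhead.1]
          rfl)
        hVemp hVcl hVnd hsum
    rw [hresm]
    obtain ⟨V2, areas2, hres2, a1, a2, a3, a4, a5⟩ :=
      ih Vm areasm (fun x hx => hl x (List.mem_cons_of_mem _ hx)) m1 m2 m3 m4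
    refine ⟨V2, areas2, hres2, a1, a2, a3, fun x hx => a4 x (m5 x hx), ?_⟩
    intro dd hdd c hc hpc
    rcases List.mem_cons.mp hdd with he | hdd'
    · have hceq : (r, c) ∈ Vm := by
        apply m6 (c, row.getD c true)
        · have := pvEnum_mem_of row 0 c true (by rw [he] at hc; exact hc)
          rw [Nat.zero_add] at this
          exact this
        · simp only
          rw [he] at hpc
          exact hpc
      rw [he]
      simp only
      exact a4 _ hceq
    · exact a5 dd hdd' c hc hpc

theorem a_value (G : List (List Bool)) (hpre : Pre_calculate_internal_area G) :
    ∃ V2 : List (ℕ × ℕ),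
      calculate_internal_area G = (((V2.filter fun p => !markF G p).length : ℕ) : Int) ∧
      (∀ x, x ∈ V2 ↔ empB G x = true) ∧ V2.Nodup := by
  obtain ⟨V2, areas2, hres, hemp, hnd, hsum, _, hcompl⟩ :=
    rows_go G hpre (pvEnum G 0) [] []
      (by
        intro rr hrr
        obtain ⟨h1, h2, h3⟩ := pvEnum_mem ([] : List Bool) hrr
        rw [Nat.sub_zero] at h3
        rw [Nat.zero_add] at h2
        exact ⟨h3, h2⟩)
      (by simp) (by simp) (by simp) (by simp)
  refine ⟨V2, ?_, ?_, hnd⟩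
  · have hunfold : calculate_internal_area G =
        (((pvRowsLoop G G.length (G.headD []).length (pvEnum G 0) [] []).map
          List.length).sum : ℕ) := rfl
    rw [hunfold, hres, hsum]
  · intro x
    constructor
    · exact hemp x
    · intro hx
      have hb := empB_elim G hx
      have hrow : (x.1, G.getD x.1 []) ∈ pvEnum G 0 := by
        have := pvEnum_mem_of G 0 x.1 [] hb.1
        rw [Nat.zero_add] at this
        exact this
      have hlen : (G.getD x.1 []).length = (G.headD []).length := by
        rw [List.getD_eq_getElem G [] hb.1]
        exact hpre _ (List.getElem_mem hb.1)
      have := hcompl (x.1, G.getD x.1 []) hrow x.2 (by rw [hlen]; exact hb.2.1) hb.2.2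
      exact this

theorem shape_gen (R C : ℕ) (f : ℕ → ℕ → Bool) :
    ((List.range R).map fun r => (List.range C).map fun c => f r c) =
      (List.range R).map fun r => (List.range C).map fun c =>
        pvMget ((List.range R).map fun r => (List.range C).map fun c => f r c) r c := by
  apply List.map_congr_left
  intro r hr
  apply List.map_congr_left
  intro c hc
  rw [mget_map, if_pos ⟨List.mem_range.mp hr, List.mem_range.mp hc⟩]

theorem iter_shape (G : List (List Bool)) (k : ℕ) :
    pvIter G k = (List.range G.length).map fun r =>
      (List.range (G.headD []).length).map fun c => pvMget (pvIter G k) r c := by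
  cases k with
  | zero =>
    rw [iter_zero]
    unfold pvMark0
    exact shape_gen _ _ _
  | succ k =>
    rw [iter_succ]
    unfold pvStep
    exact shape_gen _ _ _

theorem sum_map_cast {α : Type} (l : List α) (f : α → ℕ) :
    (l.map fun a => ((f a : ℕ) : Int)).sum = (((l.map f).sum : ℕ) : Int) := by
  induction l with
  | nil => simp
  | cons x l ih =>
    simp only [List.map_cons, List.sum_cons, ih]
    push_cast
    ring

theorem b_value (G : List (List Bool)) :
    calculate_internal_area_alt G =
      (((cellsL (G.headD []).length (List.range G.length)).countP fun p => empB G p : ℕ) : Int) -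
      (((cellsL (G.headD []).length (List.range G.length)).countP fun p => markF G p : ℕ) : Int) := by
  have hunfold : calculate_internal_area_alt G =
      ((((List.range G.length).map fun r =>
          ((List.range (G.headD []).length).filter fun c => !pvCell G r c).length).sum : ℕ) : Int) -
      ((((List.range (G.length * (G.headD []).length)).foldl
          (fun m _ => pvStep G G.length (G.headD []).length m)
          (pvMark0 G G.length (G.headD []).length)).map
            fun row => ((row.count true : ℕ) : Int)).sum) := by
    unfold calculate_internal_area_alt; rfl
  rw [hunfold, sum_map_cast, foldl_const]
  have hempties : ((List.range G.length).map fun r =>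
      ((List.range (G.headD []).length).filter fun c => !pvCell G r c).length).sum =
      (cellsL (G.headD []).length (List.range G.length)).countP fun p => empB G p := by
    rw [countP_cells (fun r => r)]
    apply congrArg
    apply List.map_congr_left
    intro r hr
    rw [List.countP_eq_length_filter]
    have : ∀ c ∈ List.range (G.headD []).length,
        (!pvCell G r c) = empB G (r, c) := by
      intro c hc
      unfold empB
      rw [decide_eq_true (List.mem_range.mp hr), decide_eq_true (List.mem_range.mp hc)]
      simp
    rw [List.filter_congr this]
  have hreach : (((pvStep G G.length (G.headD []).length)^[G.length * (G.headD []).length]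
      (pvMark0 G G.length (G.headD []).length)).map fun row => row.count true).sum =
      (cellsL (G.headD []).length (List.range G.length)).countP fun p => markF G p := by
    rw [show (pvStep G G.length (G.headD []).length)^[G.length * (G.headD []).length]
        (pvMark0 G G.length (G.headD []).length) =
        pvIter G (G.length * (G.headD []).length) from rfl]
    rw [iter_shape G (G.length * (G.headD []).length)]
    rw [List.map_map]
    rw [countP_cells (fun r => r)]
    apply congrArg
    apply List.map_congr_left
    intro r hr
    simp only [Function.comp]
    rw [List.count_eq_countP, List.countP_map]
    apply List.countP_congr
    intro c hc
    simp only [Function.comp]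
    constructor
    · intro h
      rw [beq_true] at h
      exact h
    · intro h
      rw [beq_true]
      exact h
  rw [hempties, hreach]

theorem main_equal (G : List (List Bool)) (hpre : Pre_calculate_internal_area G) :
    calculate_internal_area G = calculate_internal_area_alt G := by
  obtain ⟨V2, hAval, hmem, hnd⟩ := a_value G hpre
  have hELnd : (cellsL (G.headD []).length (List.range G.length)).Nodup :=
    nodup_cellsL List.nodup_range
  have hLEnd : ((cellsL (G.headD []).length (List.range G.length)).filter
      fun p => empB G p).Nodup := hELnd.filter _
  have hmemLE : ∀ x, x ∈ (cellsL (G.headD []).length (List.range G.length)).filter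
      (fun p => empB G p) ↔ empB G x = true := by
    intro x
    rw [List.mem_filter]
    constructor
    · exact fun h => h.2
    · intro h
      have hb := empB_elim G h
      exact ⟨mem_cellsL.mpr ⟨List.mem_range.mpr hb.1, hb.2.1⟩, h⟩
  have hVfin : V2.toFinset = ((cellsL (G.headD []).length (List.range G.length)).filter
      fun p => empB G p).toFinset := by
    ext x
    rw [List.mem_toFinset, List.mem_toFinset, hmem x, hmemLE x]
  have hlen : (V2.filter fun p => !markF G p).length =
      (((cellsL (G.headD []).length (List.range G.length)).filter fun p => empB G p).filter
        fun p => !markF G p).length := by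
    rw [← List.toFinset_card_of_nodup (hnd.filter _),
      ← List.toFinset_card_of_nodup (hLEnd.filter _),
      List.toFinset_filter, List.toFinset_filter, hVfin]
  have h1 : (cellsL (G.headD []).length (List.range G.length)).countP (fun p => markF G p) =
      ((cellsL (G.headD []).length (List.range G.length)).filter
        (fun p => empB G p)).countP (fun p => markF G p) := by
    rw [List.countP_filter]
    apply List.countP_congr
    intro a _
    constructor
    · intro h
      rw [h, (markF_sound G a h).1]
      rfl
    · intro h
      simp only [Bool.and_eq_true] at h
      exact h.1
  have h2 := countP_split ((cellsL (G.headD []).length (List.range G.length)).filter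
      (fun p => empB G p)) (fun p => markF G p)
  have h3 : ((cellsL (G.headD []).length (List.range G.length)).filter
      (fun p => empB G p)).length =
      (cellsL (G.headD []).length (List.range G.length)).countP (fun p => empB G p) :=
    (List.countP_eq_length_filter).symm
  have h4 : (((cellsL (G.headD []).length (List.range G.length)).filter fun p => empB G p).filter
      fun p => !markF G p).length =
      ((cellsL (G.headD []).length (List.range G.length)).filter
        (fun p => empB G p)).countP (fun p => !markF G p) :=
    (List.countP_eq_length_filter).symm
  rw [hAval, b_value G, hlen, h4]
  omega


-- ===== VERDICT (by name: the statement is the Claim_ definition above) =====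
theorem calculate_internal_area_spec : Claim_equal_calculate_internal_area := by
  intro grid _ hpre
  exact main_equal grid hpre
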